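-- pv_equiv track=rewrite | github.com/Right23/PythonPtit | b123_kiemTraChiaHet.py | count
-- ===== SOURCE A (Python) =====
-- def count(L, R, N):
--     cnt = 0
--     primes = sieve_of_eratosthenes(N)
--     for num in range(L, R+1):
--         divisible = False
--         for prime in primes:
--             if num%prime==0:
--                 divisible = True
--                 break
--         if divisible==False:
--             cnt+=1
--     return cnt
--
-- def sieve_of_eratosthenes(N):
--     primes = [True]*(N+1)
--     primes[0]= primes[1] = False
--     p = 2
--     while p*p <= N:
--         if primes[p]:
--             for i in range(p*p, N+1, p):
--                 primes[i] = False
--         p+=1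
--     #  mang chua cac so nguyen to nho hon N
--     prime_list = []
--     for i in range(2, N+1):
--         if primes[i]:
--             prime_list.append(i)
--     return prime_list
-- ===== SOURCE B (Python) =====
-- def count(L, R, N):
--     # Mark, for every d in 2..N, the multiples of d inside [L, R]; unmarked
--     # positions are exactly the numbers with no divisor (hence no prime) <= N.
--     if R < L:
--         return 0
--     marked = [False] * (R - L + 1)
--     for d in range(2, N + 1):
--         start = ((L + d - 1) // d) * d  # least multiple of d that is >= L
--         for m in range(start, R + 1, d):
--             marked[m - L] = True
--     return marked.count(False)
-- ===== Notes on version B (the rewrite author's own statement) =====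
-- stated objective: faster
-- what changed: Instead of sieving primes up to N and trial-dividing every number in [L,R] by the prime list, B marks, for each d in 2..N, the multiples of d inside [L,R] in a boolean segment array and counts the unmarked positions (segmented-sieve style, no primality computation at all).
import Mathlib
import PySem

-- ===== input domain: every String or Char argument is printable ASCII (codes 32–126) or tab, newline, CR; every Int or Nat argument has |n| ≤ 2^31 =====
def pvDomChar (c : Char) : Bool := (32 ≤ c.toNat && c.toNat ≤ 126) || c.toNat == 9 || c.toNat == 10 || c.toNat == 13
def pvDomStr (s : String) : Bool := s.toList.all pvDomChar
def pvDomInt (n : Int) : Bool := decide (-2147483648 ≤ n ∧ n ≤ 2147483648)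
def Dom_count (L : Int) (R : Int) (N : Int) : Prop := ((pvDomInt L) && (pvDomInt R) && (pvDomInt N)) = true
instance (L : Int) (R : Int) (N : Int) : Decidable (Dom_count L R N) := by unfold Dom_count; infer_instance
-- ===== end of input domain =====

-- B replaces A's prime sieve + per-number trial division by marking multiples of every d in 2..N
-- inside a [L,R] segment array and counting unmarked slots (measured faster; no primality test at all).


-- ===== PORT A =====
-- inner 'for i in range(p*p, N+1, p): primes[i] = False' (indices are ≥ 4, in range under Pre_)
def pvMarkMult (p stop : Int) (fl : Array Bool) : Array Bool :=
  (PySem.List.pyRange (p * p) stop p).foldl (fun fl i => fl.setIfInBounds i.toNat false) fl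

-- 'while p*p <= N: …; p += 1'
def pvSieveLoop (N : Int) (fl : Array Bool) (p : Int) : Array Bool :=
  if _h : p * p ≤ N then
    pvSieveLoop N (if fl.getD p.toNat false then pvMarkMult p (N + 1) fl else fl) (p + 1)
  else fl
termination_by (N + 1 - p).toNat
decreasing_by
  have hp : p ≤ N := by nlinarith [mul_self_nonneg (p - 1)]
  omega

-- sieve_of_eratosthenes(N); 'primes[0] = primes[1] = False' needs N ≥ 1 (Pre_), indices in range
def pvSieve (N : Int) : List Int :=
  let fl0 := ((Array.replicate (N + 1).toNat true).setIfInBounds 0 false).setIfInBounds 1 false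
  let fl := pvSieveLoop N fl0 2
  (PySem.List.pyRange 2 (N + 1) 1).filter (fun i => fl.getD i.toNat false)

def count (L : Int) (R : Int) (N : Int) : Int :=
  let primes := pvSieve N
  -- the for-prime loop with break and the 'divisible' flag is exactly List.any
  (PySem.List.pyRange L (R + 1) 1).foldl
    (fun cnt num => if primes.any (fun prime => PySem.Int.mod num prime == 0) then cnt else cnt + 1) 0

-- ===== PORT B =====
def count_alt (L : Int) (R : Int) (N : Int) : Int :=
  if R < L then 0
  else
    let marked :=
      (PySem.List.pyRange 2 (N + 1) 1).foldl
        (fun mk d =>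
          (PySem.List.pyRange (PySem.Int.floordiv (L + d - 1) d * d) (R + 1) d).foldl
            (fun mk m => mk.setIfInBounds (m - L).toNat true) mk)
        (Array.replicate (R - L + 1).toNat false)
    (PySem.List.count marked.toList false : Int)

-- ===== PRECONDITION & SPEC =====
-- Pre_ excludes exactly N < 1, where A's 'primes[1] = False' raises IndexError.
def Pre_count (L : Int) (R : Int) (N : Int) : Prop := 1 ≤ N
instance (L : Int) (R : Int) (N : Int) : Decidable (Pre_count L R N) := by unfold Pre_count; infer_instance
def pvWitness_count : Int × Int × Int := (1, 10, 5)

def Spec_count (L : Int) (R : Int) (N : Int) (out : Int) : Prop := out = count_alt L R N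
instance (L : Int) (R : Int) (N : Int) (out : Int) : Decidable (Spec_count L R N out) := by unfold Spec_count; infer_instance

-- ===== CLAIM (what is proved, stated in full; the proofs are below) =====
def Claim_equal_count : Prop := ∀ (L : Int) (R : Int) (N : Int), Dom_count L R N → Pre_count L R N → Spec_count L R N (count L R N)

-- ===== LEMMAS AND PROOFS =====

-- 'num has a divisor d with 2 ≤ d ≤ N', as a Bool over the shared index range
def pvQB (N num : Int) : Bool := (PySem.List.pyRange 2 (N + 1) 1).any (fun d => decide (d ∣ num))

theorem pvQB_iff (N num : Int) : pvQB N num = true ↔ ∃ d : Int, 2 ≤ d ∧ d ≤ N ∧ d ∣ num := by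
  simp [pvQB, List.any_eq_true, PySem.List.mem_pyRange_one]
  constructor
  · rintro ⟨d, ⟨h1, h2⟩, h3⟩; exact ⟨d, h1, by omega, h3⟩
  · rintro ⟨d, h1, h2, h3⟩; exact ⟨d, ⟨h1, by omega⟩, h3⟩

-- bridges: the Array ports viewed through toList (Python lists are ported as Arrays for O(1) index assignment)
theorem pvArr_getD (a : Array Bool) (i : Nat) (d : Bool) : a.getD i d = a.toList.getD i d := by
  unfold Array.getD List.getD
  split
  · next h => rw [List.getElem?_eq_getElem (by simpa using h)]; simp [Array.getElem_toList]
  · next h => rw [List.getElem?_eq_none (by simpa using h)]; rfl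

theorem pvToList_foldl_set (f : Int → Nat) (v : Bool) : ∀ (ms : List Int) (fl : Array Bool),
    ((ms.foldl (fun fl m => fl.setIfInBounds (f m) v) fl).toList) =
      ms.foldl (fun l m => l.set (f m) v) fl.toList := by
  intro ms
  induction ms with
  | nil => intro fl; rfl
  | cons m ms ih =>
    intro fl
    rw [List.foldl_cons, List.foldl_cons, ih, Array.toList_setIfInBounds]

-- sieve soundness invariant: a False flag at an in-range index i ≥ 2 means i has a proper divisor ≥ 2
def pvSieveInv (fl : List Bool) : Prop :=
  ∀ i : Nat, i < fl.length → fl.getD i false = false →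
    i ≤ 1 ∨ ∃ p : Int, 2 ≤ p ∧ p < (i : Int) ∧ p ∣ (i : Int)

theorem pvFoldl_set_length {v : Bool} (f : Int → Nat) : ∀ (ms : List Int) (fl : List Bool),
    ((ms.foldl (fun fl m => fl.set (f m) v) fl).length) = fl.length := by
  intro ms; induction ms with
  | nil => intro fl; rfl
  | cons m ms ih => intro fl; simpa [List.foldl_cons] using (ih (fl.set (f m) v)).trans (by simp)

theorem pvMarkMult_toList (p stop : Int) (fl : Array Bool) :
    (pvMarkMult p stop fl).toList =
      (PySem.List.pyRange (p * p) stop p).foldl (fun l i => l.set i.toNat false) fl.toList :=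
  pvToList_foldl_set _ _ _ fl

theorem pvMarkMult_length (p stop : Int) (fl : Array Bool) :
    (pvMarkMult p stop fl).toList.length = fl.toList.length := by
  rw [pvMarkMult_toList]; exact pvFoldl_set_length _ _ fl.toList

theorem pvSieveLoop_length (N : Int) (fl : Array Bool) (p : Int) :
    (pvSieveLoop N fl p).toList.length = fl.toList.length := by
  rw [pvSieveLoop]
  split
  · rw [pvSieveLoop_length]
    split
    · exact pvMarkMult_length _ _ _
    · rfl
  · rfl
termination_by (N + 1 - p).toNat
decreasing_by
  have hp : p ≤ N := by nlinarith [mul_self_nonneg (p - 1)]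
  omega

theorem pvFoldl_set_false_sound (f : Int → Nat) : ∀ (ms : List Int) (fl : List Bool) (i : Nat),
    ((ms.foldl (fun fl m => fl.set (f m) false) fl).getD i false = false) →
    fl.getD i false = false ∨ ∃ m ∈ ms, f m = i := by
  intro ms
  induction ms with
  | nil => intro fl i h; exact Or.inl h
  | cons m ms ih =>
    intro fl i h
    rcases ih (fl.set (f m) false) i h with h' | ⟨m', hm', hf⟩
    · by_cases he : f m = i
      · exact Or.inr ⟨m, List.mem_cons_self, he⟩
      · left; rwa [List.getD, List.getElem?_set_ne he] at h'
    · exact Or.inr ⟨m', List.mem_cons_of_mem _ hm', hf⟩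

theorem pvMarkMult_inv (p N : Int) (hp : 2 ≤ p) (fl : Array Bool) (h : pvSieveInv fl.toList) :
    pvSieveInv (pvMarkMult p (N + 1) fl).toList := by
  intro i hlen hfalse
  have hlen' : i < fl.toList.length := by rwa [pvMarkMult_length] at hlen
  rw [pvMarkMult_toList] at hfalse
  rcases pvFoldl_set_false_sound _ _ fl.toList i hfalse with h' | ⟨m, hm, hf⟩
  · exact h i hlen' h'
  · right
    rw [PySem.List.mem_pyRange_iff_of_pos (by omega : (0:Int) < p) m] at hm
    obtain ⟨h1, _h2, h3⟩ := hm
    have hpp : 2 * p ≤ p * p := by nlinarith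
    have hmi : (i : Int) = m := by omega
    refine ⟨p, hp, by omega, ?_⟩
    rw [hmi]
    simpa using dvd_add h3 (dvd_mul_left p p)

theorem pvSieveLoop_inv (N : Int) (fl : Array Bool) (p : Int) (hp : 2 ≤ p) (h : pvSieveInv fl.toList) :
    pvSieveInv (pvSieveLoop N fl p).toList := by
  rw [pvSieveLoop]
  split
  · exact pvSieveLoop_inv N _ (p + 1) (by omega)
      (by split
          · exact pvMarkMult_inv p N hp fl h
          · exact h)
  · exact h
termination_by (N + 1 - p).toNat
decreasing_by
  have hp' : p ≤ N := by nlinarith [mul_self_nonneg (p - 1)]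
  omega

theorem pvMem_sieve (N p : Int) (hp : p ∈ pvSieve N) : 2 ≤ p ∧ p ≤ N := by
  unfold pvSieve at hp
  simp only [List.mem_filter, PySem.List.mem_pyRange_one] at hp
  omega

theorem pvSieve_complete (N d : Int) (hN : 1 ≤ N) (hd : 2 ≤ d) (hdN : d ≤ N)
    (hmin : ∀ e : Int, 2 ≤ e → e < d → ¬ e ∣ d) : d ∈ pvSieve N := by
  unfold pvSieve
  simp only [List.mem_filter, PySem.List.mem_pyRange_one]
  refine ⟨⟨hd, by omega⟩, ?_⟩
  set fl0 := ((Array.replicate (N + 1).toNat true).setIfInBounds 0 false).setIfInBounds 1 false with hfl0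
  have hfl0l : fl0.toList = ((List.replicate (N + 1).toNat true).set 0 false).set 1 false := by
    rw [hfl0, Array.toList_setIfInBounds, Array.toList_setIfInBounds, Array.toList_replicate]
  have hinv0 : pvSieveInv fl0.toList := by
    intro i hi hfalse
    by_cases hi1 : i ≤ 1
    · exact Or.inl hi1
    · exfalso
      rw [hfl0l] at hfalse hi
      simp only [List.length_set, List.length_replicate] at hi
      rw [List.getD, List.getElem?_set_ne (by omega), List.getElem?_set_ne (by omega)] at hfalse
      simp [hi] at hfalse
  have hinv := pvSieveLoop_inv N fl0 2 (by omega) hinv0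
  have hlen : (pvSieveLoop N fl0 2).toList.length = (N + 1).toNat := by
    rw [pvSieveLoop_length, hfl0l]; simp
  by_contra hflag
  have hfalse : (pvSieveLoop N fl0 2).toList.getD d.toNat false = false := by
    rw [← pvArr_getD]
    cases hb : (pvSieveLoop N fl0 2).getD d.toNat false
    · rfl
    · exact absurd hb hflag
  rcases hinv d.toNat (by omega) hfalse with h1 | ⟨p, hp1, hp2, hp3⟩
  · omega
  · have hdt : ((d.toNat : Nat) : Int) = d := by omega
    rw [hdt] at hp2 hp3
    exact hmin p hp1 hp2 hp3

theorem pvAny_sieve_eq (N num : Int) (hN : 1 ≤ N) :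
    ((pvSieve N).any (fun prime => PySem.Int.mod num prime == 0)) = pvQB N num := by
  apply Bool.coe_iff_coe.mp
  rw [pvQB_iff, List.any_eq_true]
  constructor
  · rintro ⟨prime, hmem, hmod⟩
    obtain ⟨h1, h2⟩ := pvMem_sieve N prime hmem
    refine ⟨prime, h1, h2, ?_⟩
    rw [← PySem.Int.mod_eq_zero_iff_dvd]
    exact beq_iff_eq.mp hmod
  · rintro ⟨d, hd1, hd2, hd3⟩
    have hex : ∃ n : Nat, 2 ≤ n ∧ (n : Int) ≤ N ∧ (n : Int) ∣ num := by
      refine ⟨d.toNat, by omega, by omega, ?_⟩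
      have : ((d.toNat : Nat) : Int) = d := by omega
      rwa [this]
    classical
    obtain ⟨hm2, hmN, hmdvd⟩ := Nat.find_spec hex
    set m := Nat.find hex with hmdef
    have hmem : ((m : Nat) : Int) ∈ pvSieve N := by
      apply pvSieve_complete N _ hN (by exact_mod_cast hm2) hmN
      intro e he hem hedvd
      have : ¬ (2 ≤ e.toNat ∧ (e.toNat : Int) ≤ N ∧ (e.toNat : Int) ∣ num) :=
        Nat.find_min hex (by omega)
      have het : ((e.toNat : Nat) : Int) = e := by omega
      exact this ⟨by omega, by rw [het]; omega, by rw [het]; exact hedvd.trans hmdvd⟩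
    exact ⟨(m : Int), hmem, beq_iff_eq.mpr ((PySem.Int.mod_eq_zero_iff_dvd num (m : Int)).mpr hmdvd)⟩

theorem pvFoldl_set_true_getD (f : Int → Nat) : ∀ (ms : List Int) (mk : List Bool) (j : Nat), j < mk.length →
    (((ms.foldl (fun mk m => mk.set (f m) true) mk).getD j false = true) ↔
      (mk.getD j false = true ∨ ∃ m ∈ ms, f m = j)) := by
  intro ms
  induction ms with
  | nil => intro mk j hj; simp
  | cons m ms ih =>
    intro mk j hj
    rw [List.foldl_cons, ih (mk.set (f m) true) j (by simpa using hj)]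
    by_cases he : f m = j
    · subst he
      rw [List.getD_eq_getElem _ _ (by simpa using hj), List.getElem_set_self]
      simp only [List.mem_cons]
      constructor
      · rintro (_ | h)
        · exact Or.inr ⟨m, Or.inl rfl, rfl⟩
        · exact Or.inr (by tauto)
      · intro _; exact Or.inl trivial
    · rw [List.getD, List.getElem?_set_ne he, ← List.getD]
      simp only [List.mem_cons]
      constructor
      · rintro (h | ⟨m', hm', hf⟩)
        · exact Or.inl h
        · exact Or.inr ⟨m', Or.inr hm', hf⟩
      · rintro (h | ⟨m', hm' | hm', hf⟩)
        · exact Or.inl h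
        · exact absurd (hm' ▸ hf) he
        · exact Or.inr ⟨m', hm', hf⟩

-- membership of the inner pyRange: exactly the multiples of d in [L, R], as offsets
theorem pvInner_range_iff (L R d : Int) (hd : 2 ≤ d) (j : Nat) (hjR : (j : Int) ≤ R - L) :
    (∃ m ∈ PySem.List.pyRange (PySem.Int.floordiv (L + d - 1) d * d) (R + 1) d, (m - L).toNat = j) ↔
      d ∣ (L + j) := by
  set q := PySem.Int.floordiv (L + d - 1) d with hq
  obtain ⟨hq1, hq2⟩ := (PySem.Int.floordiv_eq_iff_of_pos (by omega : (0:Int) < d)).mp hq.symm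
  have he : (q + 1) * d = q * d + d := by ring
  have hq2' : L + d - 1 < q * d + d := by omega
  have hLs : L ≤ q * d := by omega
  have hsd : d ∣ q * d := dvd_mul_left d q
  constructor
  · rintro ⟨m, hm, hjm⟩
    rw [PySem.List.mem_pyRange_iff_of_pos (by omega : (0:Int) < d) m] at hm
    obtain ⟨h1, h2, h3⟩ := hm
    have hdm : d ∣ m := by simpa using dvd_add h3 hsd
    have hm0 : L ≤ m := le_trans hLs h1
    have hmj : m = L + (j : Int) := by omega
    rwa [← hmj]
  · intro hdvd
    refine ⟨L + (j : Int), ?_, by omega⟩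
    rw [PySem.List.mem_pyRange_iff_of_pos (by omega : (0:Int) < d)]
    have hdm : d ∣ (L + (j : Int) - q * d) := dvd_sub hdvd hsd
    have hge : q * d ≤ L + (j : Int) := by
      by_contra hlt
      rw [not_le] at hlt
      have hdiff : d ∣ (q * d - (L + (j : Int))) := dvd_sub hsd hdvd
      have := Int.le_of_dvd (by omega) hdiff
      omega
    exact ⟨hge, by omega, hdm⟩

theorem pvOuter_fold (L R N : Int) (j : Nat) (hjR : (j : Int) ≤ R - L) :
    ∀ (c : Int) (mk : List Bool), 2 ≤ c → j < mk.length →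
      (((PySem.List.pyRange c (N + 1) 1).foldl
        (fun mk d =>
          (PySem.List.pyRange (PySem.Int.floordiv (L + d - 1) d * d) (R + 1) d).foldl
            (fun mk m => mk.set (m - L).toNat true) mk) mk).getD j false = true ↔
        (mk.getD j false = true ∨ ∃ d : Int, c ≤ d ∧ d ≤ N ∧ d ∣ (L + j))) := by
  intro c
  generalize hk : (N + 1 - c).toNat = k
  induction k generalizing c with
  | zero =>
    intro mk hc hj
    rw [PySem.List.pyRange_one_eq_nil (by omega)]
    simp only [List.foldl_nil]
    constructor
    · exact Or.inl
    · rintro (h | ⟨d, hd1, hd2, _⟩)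
      · exact h
      · omega
  | succ k ih =>
    intro mk hc hj
    have hcN : c ≤ N := by omega
    rw [PySem.List.pyRange_one_cons (by omega), List.foldl_cons]
    have hlen : ((PySem.List.pyRange (PySem.Int.floordiv (L + c - 1) c * c) (R + 1) c).foldl
        (fun mk m => mk.set (m - L).toNat true) mk).length = mk.length :=
      pvFoldl_set_length (fun m => (m - L).toNat) _ mk
    rw [ih (c + 1) (by omega) _ (by omega) (by omega)]
    rw [pvFoldl_set_true_getD (fun m => (m - L).toNat) _ mk j hj]
    simp only [pvInner_range_iff L R c hc j hjR]
    constructor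
    · rintro ((h | hc') | ⟨d, hd1, hd2, hd3⟩)
      · exact Or.inl h
      · exact Or.inr ⟨c, le_refl c, hcN, hc'⟩
      · exact Or.inr ⟨d, by omega, hd2, hd3⟩
    · rintro (h | ⟨d, hd1, hd2, hd3⟩)
      · exact Or.inl (Or.inl h)
      · by_cases hdc : d = c
        · exact Or.inl (Or.inr (hdc ▸ hd3))
        · exact Or.inr ⟨d, by omega, hd2, hd3⟩

theorem count_eq_countP (L R N : Int) :
    count L R N = (((PySem.List.pyRange L (R + 1) 1).countP
      (fun num => !((pvSieve N).any (fun prime => PySem.Int.mod num prime == 0)))) : Int) := by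
  have hfun : ∀ (cnt : Int) (num : Int),
      (if (pvSieve N).any (fun prime => PySem.Int.mod num prime == 0) then cnt else cnt + 1) =
      (if (!((pvSieve N).any (fun prime => PySem.Int.mod num prime == 0))) then cnt + 1 else cnt) := by
    intro cnt num
    cases (pvSieve N).any (fun prime => PySem.Int.mod num prime == 0) <;> simp
  simp only [count, hfun]
  rw [PySem.List.foldl_if_add_one]
  simp

theorem pvOuterFold_length (L R : Int) : ∀ (ds : List Int) (mk : List Bool),
    ((ds.foldl (fun mk d => (PySem.List.pyRange (PySem.Int.floordiv (L + d - 1) d * d) (R + 1) d).foldl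
      (fun mk m => mk.set (m - L).toNat true) mk) mk).length) = mk.length := by
  intro ds
  induction ds with
  | nil => intro mk; rfl
  | cons d ds ih => intro mk; rw [List.foldl_cons, ih]; exact pvFoldl_set_length _ _ mk

theorem pvOuterFold_toList (L R : Int) : ∀ (ds : List Int) (mk : Array Bool),
    ((ds.foldl (fun mk d => (PySem.List.pyRange (PySem.Int.floordiv (L + d - 1) d * d) (R + 1) d).foldl
      (fun mk m => mk.setIfInBounds (m - L).toNat true) mk) mk).toList) =
    ds.foldl (fun mk d => (PySem.List.pyRange (PySem.Int.floordiv (L + d - 1) d * d) (R + 1) d).foldl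
      (fun mk m => mk.set (m - L).toNat true) mk) mk.toList := by
  intro ds
  induction ds with
  | nil => intro mk; rfl
  | cons d ds ih =>
    intro mk
    rw [List.foldl_cons, List.foldl_cons, ih, pvToList_foldl_set]

theorem count_alt_eq_countP (L R N : Int) (hLR : L ≤ R) :
    count_alt L R N = (((List.range (R - L + 1).toNat).countP (fun j : Nat => !pvQB N (L + (j : Int)))) : Int) := by
  simp only [count_alt]
  rw [if_neg (by omega)]
  set K := (R - L + 1).toNat with hK
  rw [pvOuterFold_toList, Array.toList_replicate]
  set marked := (PySem.List.pyRange 2 (N + 1) 1).foldl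
      (fun mk d => (PySem.List.pyRange (PySem.Int.floordiv (L + d - 1) d * d) (R + 1) d).foldl
        (fun mk m => mk.set (m - L).toNat true) mk) (List.replicate K false) with hmarked
  have hlen : marked.length = K := by
    rw [hmarked, pvOuterFold_length]; simp
  have hmk : marked = (List.range K).map (fun j : Nat => pvQB N (L + (j : Int))) := by
    apply List.ext_getElem
    · simp [hlen]
    · intro j h1 h2
      rw [List.getElem_map]
      have hjK : j < K := by rwa [hlen] at h1
      have hjR : (j : Int) ≤ R - L := by omega
      rw [← List.getD_eq_getElem marked false h1]
      apply Bool.coe_iff_coe.mp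
      rw [hmarked]
      rw [pvOuter_fold L R N j hjR 2 (List.replicate K false) (by omega) (by simpa using hjK)]
      rw [pvQB_iff]
      have hrep : (List.replicate K false).getD j false = false := by
        simp [List.getD]
      rw [hrep]
      simp
  rw [hmk, PySem.List.count_eq]
  congr 1
  rw [List.count_eq_countP, List.countP_map]
  apply List.countP_congr
  intro j _
  simp [Function.comp]

-- ===== VERDICT (by name: the statement is the Claim_ definition above) =====
theorem count_spec : Claim_equal_count := by
  intro L R N _hD hN
  unfold Spec_count
  by_cases hLR : L ≤ R
  · rw [count_eq_countP, count_alt_eq_countP L R N hLR]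
    congr 1
    rw [PySem.List.pyRange_one, List.countP_map]
    have hK : (R + 1 - L).toNat = (R - L + 1).toNat := by omega
    rw [hK]
    apply List.countP_congr
    intro j _
    simp only [Function.comp]
    rw [pvAny_sieve_eq N (L + j) hN]
  · have h1 : count L R N = 0 := by
      unfold count
      rw [PySem.List.pyRange_one_eq_nil (by omega)]
      rfl
    have h2 : count_alt L R N = 0 := by
      unfold count_alt
      rw [if_pos (by omega)]
    rw [h1, h2]
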